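-- pv_equiv track=rewrite | github.com/GLGAIresale5/Resa-Le-5 | backend/agents/review_agent.py | _extract_complaints
-- ===== SOURCE A (Python) =====
-- _COMPLAINT_KEYWORDS = {
--     "attente": "le temps d'attente",
--     "lent": "la lenteur du service",
--     "lente": "la lenteur du service",
--     "service": "le service",
--     "bruit": "le niveau sonore",
--     "bruyant": "le niveau sonore",
--     "froid": "le plat servi froid",
--     "froide": "le plat servi froid",
--     "cher": "les prix",
--     "prix": "les prix",
--     "portion": "la taille des portions",
--     "portions": "la taille des portions",
-- }
--
-- def _extract_complaints(review_content: str) -> list: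
--     content_lower = review_content.lower()
--     found = []
--     seen = set()
--     for keyword, label in _COMPLAINT_KEYWORDS.items():
--         if keyword in content_lower and label not in seen:
--             found.append(label)
--             seen.add(label)
--     return found
-- ===== SOURCE B (Python) =====
-- _COMPLAINT_KEYWORDS = {
--     "attente": "le temps d'attente",
--     "lent": "la lenteur du service",
--     "lente": "la lenteur du service",
--     "service": "le service",
--     "bruit": "le niveau sonore",
--     "bruyant": "le niveau sonore",
--     "froid": "le plat servi froid",
--     "froide": "le plat servi froid",
--     "cher": "les prix",
--     "prix": "les prix",
--     "portion": "la taille des portions",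
--     "portions": "la taille des portions",
-- }
--
--
-- def _extract_complaints(review_content: str) -> list:
--     # Group keywords by label once (labels keep first-appearance order),
--     # then emit a label when any of its keywords occurs in the text.
--     by_label = {}
--     for keyword, label in _COMPLAINT_KEYWORDS.items():
--         by_label[label] = by_label.get(label, []) + [keyword]
--     content_lower = review_content.lower()
--     return [label for label, kws in by_label.items()
--             if any(kw in content_lower for kw in kws)]
-- ===== Notes on version B (the rewrite author's own statement) =====
-- stated objective: simpler
-- what changed: B groups the keyword dict by label once and emits each label when any of its keywords occurs in the lowercased text, replacing A's per-keyword loop with an explicit seen-set dedup by a per-label any-scan over a grouped mapping.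
import Mathlib
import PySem

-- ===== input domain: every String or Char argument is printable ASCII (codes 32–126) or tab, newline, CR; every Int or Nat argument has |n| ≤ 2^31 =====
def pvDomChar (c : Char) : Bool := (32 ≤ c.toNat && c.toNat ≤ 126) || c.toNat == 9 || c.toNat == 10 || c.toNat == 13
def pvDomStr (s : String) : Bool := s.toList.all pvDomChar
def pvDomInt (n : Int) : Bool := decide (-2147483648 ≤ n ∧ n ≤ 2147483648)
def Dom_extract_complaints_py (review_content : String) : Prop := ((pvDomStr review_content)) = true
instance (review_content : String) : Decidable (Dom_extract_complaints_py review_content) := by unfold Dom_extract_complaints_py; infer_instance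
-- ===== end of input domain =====

-- B groups the keywords by label once and emits each label when any of its keywords
-- occurs in the lowercased text; this removes A's explicit dedup set. Objective: simpler.

-- ===== PORT A =====
-- the module-level _COMPLAINT_KEYWORDS dict, in insertion order
def complaintKeywords : List (String × String) :=
  [("attente", "le temps d'attente"),
   ("lent", "la lenteur du service"),
   ("lente", "la lenteur du service"),
   ("service", "le service"),
   ("bruit", "le niveau sonore"),
   ("bruyant", "le niveau sonore"),
   ("froid", "le plat servi froid"),
   ("froide", "le plat servi froid"),
   ("cher", "les prix"),
   ("prix", "les prix"),
   ("portion", "la taille des portions"),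
   ("portions", "la taille des portions")]

def extract_complaints_py (review_content : String) : List String :=
  let content_lower := PySem.Str.lower review_content
  let r := complaintKeywords.foldl
    (fun (st : List String × PySem.Set String) kv =>
      if PySem.Str.isIn kv.1 content_lower && !(PySem.Set.contains st.2 kv.2)
      then (st.1 ++ [kv.2], PySem.Set.add st.2 kv.2)
      else st)
    ([], PySem.Set.empty)
  r.1

-- ===== PORT B =====
def extract_complaints_py_alt (review_content : String) : List String :=
  let by_label : PySem.Dict String (List String) :=
    complaintKeywords.foldl
      (fun d kv => d.insert kv.2 (d.getD kv.2 [] ++ [kv.1])) PySem.Dict.empty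
  let content_lower := PySem.Str.lower review_content
  (by_label.items.filter
    (fun p => p.2.any (fun kw => PySem.Str.isIn kw content_lower))).map Prod.fst

-- ===== PRECONDITION & SPEC =====
def Spec_extract_complaints_py (review_content : String) (out : List String) : Prop := out = extract_complaints_py_alt review_content
instance (review_content : String) (out : List String) : Decidable (Spec_extract_complaints_py review_content out) := by unfold Spec_extract_complaints_py; infer_instance

-- ===== CLAIM (what is proved, stated in full; the proofs are below) =====
def Claim_equal_extract_complaints_py : Prop := ∀ (review_content : String), Dom_extract_complaints_py review_content → Spec_extract_complaints_py review_content (extract_complaints_py review_content)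

-- ===== LEMMAS AND PROOFS =====

-- A's step function, abstracted over the match predicate b
def pvAStep (b : String → Bool) (st : List String × PySem.Set String) (kv : String × String) :
    List String × PySem.Set String :=
  if b kv.1 && !(PySem.Set.contains st.2 kv.2)
  then (st.1 ++ [kv.2], PySem.Set.add st.2 kv.2)
  else st

-- the keyword table, grouped into contiguous blocks of equal label (label, keywords)
def pvBlocks : List (String × List String) :=
  [("le temps d'attente", ["attente"]),
   ("la lenteur du service", ["lent", "lente"]),
   ("le service", ["service"]),
   ("le niveau sonore", ["bruit", "bruyant"]),
   ("le plat servi froid", ["froid", "froide"]),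
   ("les prix", ["cher", "prix"]),
   ("la taille des portions", ["portion", "portions"])]

-- once a label is in `seen`, the whole block of its keyword pairs is skipped
theorem pvA_absorb (b : String → Bool) (L : String) (ks : List String)
    (acc : List String) (seen : PySem.Set String) (h : L ∈ seen) :
    (ks.map (fun k => (k, L))).foldl (pvAStep b) (acc, seen) = (acc, seen) := by
  induction ks with
  | nil => rfl
  | cons k ks ih =>
    simp only [List.map_cons, List.foldl_cons]
    have hc : PySem.Set.contains seen L = true := (PySem.Set.contains_iff seen L).mpr h
    simp only [pvAStep, hc, Bool.not_true, Bool.and_false, Bool.false_eq_true, reduceIte]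
    exact ih

-- processing one fresh block emits its label iff some keyword matches
theorem pvA_block (b : String → Bool) (L : String) (ks : List String)
    (acc : List String) (seen : PySem.Set String) (h : L ∉ seen) :
    (ks.map (fun k => (k, L))).foldl (pvAStep b) (acc, seen) =
      if ks.any b then (acc ++ [L], PySem.Set.add seen L) else (acc, seen) := by
  induction ks generalizing acc with
  | nil => simp
  | cons k ks ih =>
    have hc : PySem.Set.contains seen L = false := by
      simp [h]
    simp only [List.map_cons, List.foldl_cons, List.any_cons]
    rcases Bool.eq_false_or_eq_true (b k) with hb | hb
    all_goals simp only [pvAStep, hb, hc, Bool.and_true, Bool.not_false,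
      Bool.true_or, Bool.false_or, Bool.false_eq_true, reduceIte, if_true]
    · exact pvA_absorb b L ks (acc ++ [L]) (PySem.Set.add seen L)
        ((PySem.Set.mem_add seen L L).mpr (Or.inr rfl))
    · exact ih acc

-- A's whole loop over the concatenated blocks = keep the labels whose block matches
theorem pvA_all (b : String → Bool) (bl : List (String × List String))
    (acc : List String) (seen : PySem.Set String)
    (hfresh : ∀ p ∈ bl, p.1 ∉ seen) (hnd : (bl.map Prod.fst).Nodup) :
    ((bl.flatMap (fun p => p.2.map (fun k => (k, p.1)))).foldl (pvAStep b) (acc, seen)).1 =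
      acc ++ (bl.filter (fun p => p.2.any b)).map Prod.fst := by
  induction bl generalizing acc seen with
  | nil => simp
  | cons p bl ih =>
    simp only [List.flatMap_cons, List.foldl_append]
    rw [pvA_block b p.1 p.2 acc seen (hfresh p (List.mem_cons_self))]
    simp only [List.map_cons, List.nodup_cons] at hnd
    cases ha : p.2.any b with
    | false =>
      simp only [Bool.false_eq_true, reduceIte, List.filter_cons, ha]
      exact ih acc seen (fun q hq => hfresh q (List.mem_cons_of_mem p hq)) hnd.2
    | true =>
      simp only [reduceIte, List.filter_cons, ha, List.map_cons]
      rw [ih (acc ++ [p.1]) (PySem.Set.add seen p.1)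
        (fun q hq hmem => by
          rcases (PySem.Set.mem_add seen p.1 q.1).mp hmem with hin | heq
          · exact hfresh q (List.mem_cons_of_mem p hq) hin
          · exact hnd.1 (heq ▸ List.mem_map_of_mem hq)) hnd.2]
      simp

-- ===== VERDICT (by name: the statement is the Claim_ definition above) =====
theorem extract_complaints_py_spec : Claim_equal_extract_complaints_py := by
  intro s _
  unfold Spec_extract_complaints_py extract_complaints_py extract_complaints_py_alt
  dsimp only
  -- B's grouped dict, built from the literal table, evaluates to the blocks
  have hflat : complaintKeywords =
      pvBlocks.flatMap (fun p => p.2.map (fun k => (k, p.1))) := by decide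
  -- B's grouped dict, built from the literal table, evaluates to the blocks
  have hitems : (((pvBlocks.flatMap (fun p => p.2.map (fun k => (k, p.1)))).foldl
      (fun (d : PySem.Dict String (List String)) kv =>
        d.insert kv.2 (d.getD kv.2 [] ++ [kv.1])) PySem.Dict.empty)).items = pvBlocks := by
    decide
  rw [hflat]
  rw [show (fun (st : List String × PySem.Set String) kv =>
      if PySem.Str.isIn kv.1 (PySem.Str.lower s) && !(PySem.Set.contains st.2 kv.2)
      then (st.1 ++ [kv.2], PySem.Set.add st.2 kv.2)
      else st) = pvAStep (fun kw => PySem.Str.isIn kw (PySem.Str.lower s)) from rfl]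
  rw [pvA_all (fun kw => PySem.Str.isIn kw (PySem.Str.lower s)) pvBlocks []
      PySem.Set.empty (by decide) (by decide)]
  simp only [hitems, List.nil_append]
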